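-- pv_equiv track=rewrite | github.com/Compsci2XC3G48/Finalproject_G48 | mainPart6.py | count_transfers
-- ===== SOURCE A (Python) =====
-- def count_transfers(path, connection_lookup):
--     if not path or len(path) < 2:
--         return 0
--     current_line = connection_lookup.get((path[0], path[1]))
--     transfers = 0
--     for i in range(1, len(path)-1):
--         segment_line = connection_lookup.get((path[i], path[i+1]))
--         if segment_line != current_line:
--             transfers += 1
--             current_line = segment_line
--     return transfers
-- ===== SOURCE B (Python) =====
-- def count_transfers(path, connection_lookup):
--     if not path or len(path) < 2:
--         return 0
--     lines = [connection_lookup.get(seg) for seg in zip(path, path[1:])]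
--
--     def changes(lo, hi):
--         # number of adjacent unequal pairs within lines[lo:hi], divide and conquer
--         if hi - lo <= 1:
--             return 0
--         mid = (lo + hi) // 2
--         return changes(lo, mid) + changes(mid, hi) + (lines[mid - 1] != lines[mid])
--
--     return changes(0, len(lines))
-- ===== Notes on version B (the rewrite author's own statement) =====
-- stated objective: alternative
-- what changed: Replaces A's single-pass running current_line accumulator with a two-stage approach: build the per-segment line list, then count adjacent unequal pairs by divide-and-conquer (recursively split the index range in half, summing the halves plus the boundary comparison).
import Mathlib
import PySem

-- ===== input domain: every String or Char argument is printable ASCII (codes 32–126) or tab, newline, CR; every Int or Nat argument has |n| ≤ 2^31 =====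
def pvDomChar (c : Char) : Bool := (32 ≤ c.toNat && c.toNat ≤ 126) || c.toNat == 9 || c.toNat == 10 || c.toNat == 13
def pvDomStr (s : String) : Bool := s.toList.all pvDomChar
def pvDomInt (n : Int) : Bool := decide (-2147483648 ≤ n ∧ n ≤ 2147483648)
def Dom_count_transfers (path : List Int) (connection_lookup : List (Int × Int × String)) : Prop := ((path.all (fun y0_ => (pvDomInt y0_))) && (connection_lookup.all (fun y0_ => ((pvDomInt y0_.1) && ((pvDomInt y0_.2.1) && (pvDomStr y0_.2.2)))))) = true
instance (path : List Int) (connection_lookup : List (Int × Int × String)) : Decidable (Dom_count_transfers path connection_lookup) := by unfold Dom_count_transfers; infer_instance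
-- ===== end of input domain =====

-- B replaces A's running current_line accumulator pass by building the per-segment line list
-- and counting adjacent unequal pairs by divide-and-conquer on the index range; objective: alternative.

-- dict.get on keys (a, b): first matching triple, none if absent (exact: dict keys are unique)
def connGet (cl : List (Int × Int × String)) (a b : Int) : Option String :=
  match cl with
  | [] => none
  | (x, y, v) :: t => if x = a && y = b then some v else connGet t a b

-- ===== PORT A =====
def count_transfers (path : List Int) (connection_lookup : List (Int × Int × String)) : Int :=
  if path = [] ∨ path.length < 2 then 0
  else
    let current_line := connGet connection_lookup (PySem.List.pyGetD path 0 0) (PySem.List.pyGetD path 1 0)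
    let r := (PySem.List.pyRange 1 ((path.length : Int) - 1) 1).foldl
      (fun (st : Option String × Int) i =>
        let segment_line := connGet connection_lookup (PySem.List.pyGetD path i 0) (PySem.List.pyGetD path (i + 1) 0)
        if segment_line ≠ st.1 then (segment_line, st.2 + 1) else st)
      (current_line, 0)
    r.2

-- ===== PORT B =====
-- divide-and-conquer count of adjacent unequal pairs within lines[lo:hi] (Source B's inner `changes`;
-- indices are in range on every reachable call, so getD reads the same element Python does)
-- structural fuel recursion: fuel = hi - lo bounds the recursion depth (totality guard only)
def changesGo (lines : List (Option String)) : Nat → Nat → Nat → Int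
  | 0, _, _ => 0
  | fuel + 1, lo, hi =>
    if hi ≤ lo + 1 then 0
    else
      let mid := (lo + hi) / 2
      changesGo lines fuel lo mid + changesGo lines fuel mid hi +
        (if lines.getD (mid - 1) none ≠ lines.getD mid none then 1 else 0)

def changes (lines : List (Option String)) (lo hi : Nat) : Int :=
  changesGo lines (hi - lo) lo hi

def count_transfers_alt (path : List Int) (connection_lookup : List (Int × Int × String)) : Int :=
  if path = [] ∨ path.length < 2 then 0
  else
    let lines := (path.zip path.tail).map (fun p => connGet connection_lookup p.1 p.2)
    changes lines 0 lines.length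

-- ===== PRECONDITION & SPEC =====
def Spec_count_transfers (path : List Int) (connection_lookup : List (Int × Int × String)) (out : Int) : Prop := out = count_transfers_alt path connection_lookup
instance (path : List Int) (connection_lookup : List (Int × Int × String)) (out : Int) : Decidable (Spec_count_transfers path connection_lookup out) := by unfold Spec_count_transfers; infer_instance

-- ===== CLAIM (what is proved, stated in full; the proofs are below) =====
def Claim_equal_count_transfers : Prop := ∀ (path : List Int) (connection_lookup : List (Int × Int × String)), Dom_count_transfers path connection_lookup → Spec_count_transfers path connection_lookup (count_transfers path connection_lookup)

-- ===== LEMMAS AND PROOFS =====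

-- number of runs of consecutive equal elements (A's accumulator counts run boundaries)
def runCount : List (Option String) → Int
  | [] => 0
  | [_] => 1
  | x :: y :: t => (if x = y then 0 else 1) + runCount (y :: t)

-- linear count of adjacent unequal pairs
def adjCount : List (Option String) → Int
  | [] => 0
  | [_] => 0
  | x :: y :: t => (if x = y then 0 else 1) + adjCount (y :: t)

-- A's i-th segment line, read by index
def segf (cl : List (Int × Int × String)) (path : List Int) (i : Int) : Option String :=
  connGet cl (PySem.List.pyGetD path i 0) (PySem.List.pyGetD path (i + 1) 0)

lemma segf_shift (cl : List (Int × Int × String)) (a : Int) (cs : List Int) (k : Nat) :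
    segf cl (a :: cs) ((k : Int) + 1) = segf cl cs (k : Int) := by
  unfold segf
  have h2 : (k : Int) + 1 + 1 = ((k + 2 : Nat) : Int) := by push_cast; ring
  have h1 : (k : Int) + 1 = ((k + 1 : Nat) : Int) := by push_cast; ring
  rw [h2, h1, PySem.List.pyGetD_natCast, PySem.List.pyGetD_natCast,
      PySem.List.pyGetD_natCast, PySem.List.pyGetD_natCast]
  simp [List.getD]

lemma segf_zero (cl : List (Int × Int × String)) (a b : Int) (cs : List Int) :
    segf cl (a :: b :: cs) 0 = connGet cl a b := by
  unfold segf
  have h1 : (0 : Int) + 1 = ((1 : Nat) : Int) := by norm_num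
  have h0 : (0 : Int) = ((0 : Nat) : Int) := by norm_num
  rw [h1, h0, PySem.List.pyGetD_natCast, PySem.List.pyGetD_natCast]
  simp [List.getD]

lemma lines_eq (cl : List (Int × Int × String)) :
    ∀ (path : List Int),
      (path.zip path.tail).map (fun p => connGet cl p.1 p.2)
        = (PySem.List.pyRange 0 ((path.length : Int) - 1) 1).map (segf cl path) := by
  intro path
  induction path with
  | nil => simp [PySem.List.pyRange_one_eq_nil]
  | cons a t ih =>
    cases t with
    | nil => simp [PySem.List.pyRange_one_eq_nil]
    | cons b t' =>
      have hlen : (0:Int) < ((a :: b :: t').length : Int) - 1 := by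
        simp
      rw [PySem.List.pyRange_one_cons hlen]
      simp only [List.zip_cons_cons, List.tail_cons, List.map_cons]
      congr 1
      · exact (segf_zero cl a b t').symm
      · simp only [List.tail_cons] at ih
        rw [ih, PySem.List.pyRange_one 0, PySem.List.pyRange_one (0+1), List.map_map, List.map_map]
        have hn : ((((a :: b :: t').length : Int) - 1) - (0 + 1)).toNat
            = (((b :: t').length : Int) - 1 - 0).toNat := by
          simp
        rw [hn]
        refine List.map_congr_left (fun k hk => ?_)
        simp only [Function.comp_apply]
        have : (0:Int) + 1 + (k : Int) = (k : Int) + 1 := by ring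
        rw [this, segf_shift]
        norm_num

lemma fold_runs (ls : List (Option String)) : ∀ (cur : Option String) (k : Int),
    (ls.foldl (fun (st : Option String × Int) s =>
        if s ≠ st.1 then (s, st.2 + 1) else st) (cur, k)).2
      = k + runCount (cur :: ls) - 1 := by
  induction ls with
  | nil => intro cur k; simp [runCount]
  | cons s t ih =>
    intro cur k
    simp only [List.foldl_cons]
    by_cases h : s = cur
    · subst h
      simp only [ne_eq, not_true_eq_false, if_false]
      rw [ih]
      simp [runCount]
    · simp only [ne_eq, h, not_false_eq_true, if_true]
      rw [ih]
      have hr : runCount (cur :: s :: t) = (if cur = s then 0 else 1) + runCount (s :: t) := rfl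
      rw [hr, if_neg (fun hh => h hh.symm)]
      omega

lemma foldl_seg (f : Int → Option String) (l : List Int) (init : Option String × Int) :
    l.foldl (fun (st : Option String × Int) i =>
        if f i ≠ st.1 then (f i, st.2 + 1) else st) init
      = (l.map f).foldl (fun (st : Option String × Int) s =>
          if s ≠ st.1 then (s, st.2 + 1) else st) init := by
  rw [List.foldl_map]

lemma runCount_eq_adjCount : ∀ (l : List (Option String)), l ≠ [] → runCount l = adjCount l + 1 := by
  intro l
  induction l with
  | nil => intro h; exact absurd rfl h
  | cons x t ih =>
    intro _
    cases t with
    | nil => simp [runCount, adjCount]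
    | cons y t' =>
      have := ih (by simp)
      simp only [runCount, adjCount] at *
      omega

lemma adjCount_small (l : List (Option String)) (h : l.length ≤ 1) : adjCount l = 0 := by
  match l, h with
  | [], _ => rfl
  | [_], _ => rfl

lemma adjCount_append (l1 l2 : List (Option String)) (h1 : l1 ≠ []) (h2 : l2 ≠ []) :
    adjCount (l1 ++ l2)
      = adjCount l1 + adjCount l2 + (if l1.getLast? = l2.head? then 0 else 1) := by
  induction l1 with
  | nil => exact absurd rfl h1
  | cons x t ih =>
    cases t with
    | nil =>
      cases l2 with
      | nil => exact absurd rfl h2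
      | cons y t2 =>
        simp only [List.cons_append, List.nil_append, adjCount, List.getLast?_singleton,
          List.head?_cons]
        by_cases hxy : x = y
        · subst hxy; simp
        · rw [if_neg hxy, if_neg (by simpa using hxy)]
          omega
    | cons z t' =>
      have hih := ih (by simp)
      simp only [List.cons_append] at *
      have hA : adjCount (x :: z :: (t' ++ l2))
          = (if x = z then 0 else 1) + adjCount (z :: (t' ++ l2)) := rfl
      have hB : adjCount (x :: z :: t') = (if x = z then 0 else 1) + adjCount (z :: t') := rfl
      have hlast : (x :: z :: t').getLast? = (z :: t').getLast? := by
        simp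
      rw [hA, hB, hlast, hih]
      omega

lemma changesGo_eq (l : List (Option String)) :
    ∀ (n lo hi : Nat), hi - lo ≤ n → hi ≤ l.length →
      changesGo l n lo hi = adjCount ((l.drop lo).take (hi - lo)) := by
  intro n
  induction n with
  | zero =>
    intro lo hi hn _
    rw [changesGo]
    rw [adjCount_small]
    simp; omega
  | succ n ih =>
    intro lo hi hn hlen
    rw [changesGo]
    by_cases hsmall : hi ≤ lo + 1
    · rw [if_pos hsmall, adjCount_small]
      simp; omega
    · rw [if_neg hsmall]
      have hlohi : lo + 2 ≤ hi := by omega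
      show changesGo l n lo ((lo + hi) / 2) + changesGo l n ((lo + hi) / 2) hi +
          (if l.getD ((lo + hi) / 2 - 1) none ≠ l.getD ((lo + hi) / 2) none then 1 else 0)
        = adjCount ((l.drop lo).take (hi - lo))
      have hm1 : lo < (lo + hi) / 2 := by omega
      have hm2 : (lo + hi) / 2 < hi := by omega
      generalize hg : (lo + hi) / 2 = mid at hm1 hm2 ⊢
      rw [ih lo mid (by omega) (by omega), ih mid hi (by omega) hlen]
      have hsplit : (l.drop lo).take (hi - lo)
          = (l.drop lo).take (mid - lo) ++ (l.drop mid).take (hi - mid) := by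
        have h2 : hi - lo = (mid - lo) + (hi - mid) := by omega
        have h3 : mid - lo + lo = mid := by omega
        have h3' : lo + (mid - lo) = mid := by omega
        rw [h2, List.take_add, List.drop_drop]
        first | rw [h3] | rw [h3']
      rw [hsplit]
      have hlen1 : ((l.drop lo).take (mid - lo)).length = mid - lo := by
        simp; omega
      have hlen2 : ((l.drop mid).take (hi - mid)).length = hi - mid := by
        simp; omega
      rw [adjCount_append _ _ (by intro h; rw [h] at hlen1; simp at hlen1; omega)
          (by intro h; rw [h] at hlen2; simp at hlen2; omega)]
      have hlast : ((l.drop lo).take (mid - lo)).getLast? = l[mid - 1]? := by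
        rw [List.getLast?_eq_getElem?, hlen1, List.getElem?_take_of_lt (by omega),
            List.getElem?_drop]
        congr 1
        omega
      have hhead : ((l.drop mid).take (hi - mid)).head? = l[mid]? := by
        rw [List.head?_eq_getElem?, List.getElem?_take_of_lt (by omega), List.getElem?_drop]
        simp
      rw [hlast, hhead]
      have hg1 : l.getD (mid - 1) none = l[mid - 1]?.getD none := by
        simp [List.getD]
      have hg2 : l.getD mid none = l[mid]?.getD none := by
        simp [List.getD]
      have he1 : l[mid - 1]? = some (l[mid - 1]'(by omega)) := List.getElem?_eq_getElem (by omega)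
      have he2 : l[mid]? = some (l[mid]'(by omega)) := List.getElem?_eq_getElem (by omega)
      rw [hg1, hg2, he1, he2]
      simp only [Option.getD_some]
      have : (some (l[mid - 1]'(by omega)) = some (l[mid]'(by omega)))
          = ((l[mid - 1]'(by omega)) = (l[mid]'(by omega))) := by simp
      split_ifs with h1 h2 h2 <;> first | omega | (exfalso; simp_all)

-- ===== VERDICT (by name: the statement is the Claim_ definition above) =====
theorem count_transfers_spec : Claim_equal_count_transfers := by
  intro path cl _
  unfold Spec_count_transfers count_transfers count_transfers_alt
  match path with
  | [] => simp
  | [a] => simp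
  | a :: b :: t =>
    have hg : ¬(a :: b :: t = [] ∨ (a :: b :: t).length < 2) := by simp
    rw [if_neg hg, if_neg hg]
    set lines := ((a :: b :: t).zip (a :: b :: t).tail).map (fun p => connGet cl p.1 p.2) with hlines
    show ((PySem.List.pyRange 1 (((a :: b :: t).length : Int) - 1) 1).foldl
        (fun (st : Option String × Int) i =>
          if segf cl (a :: b :: t) i ≠ st.1 then (segf cl (a :: b :: t) i, st.2 + 1) else st)
        (connGet cl (PySem.List.pyGetD (a :: b :: t) 0 0) (PySem.List.pyGetD (a :: b :: t) 1 0), 0)).2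
      = changes lines 0 lines.length
    have hcur : connGet cl (PySem.List.pyGetD (a :: b :: t) 0 0) (PySem.List.pyGetD (a :: b :: t) 1 0)
        = segf cl (a :: b :: t) 0 := by
      rw [segf_zero]
      have h1 : (1 : Int) = ((1 : Nat) : Int) := by norm_num
      have h0 : (0 : Int) = ((0 : Nat) : Int) := by norm_num
      rw [h1, h0, PySem.List.pyGetD_natCast, PySem.List.pyGetD_natCast]
      simp [List.getD]
    have hne : lines ≠ [] := by
      rw [hlines]; simp
    rw [hcur, foldl_seg (segf cl (a :: b :: t)), fold_runs]
    have hlinesR : lines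
        = segf cl (a :: b :: t) 0 ::
          (PySem.List.pyRange (0 + 1) (((a :: b :: t).length : Int) - 1) 1).map (segf cl (a :: b :: t)) := by
      rw [hlines, lines_eq cl (a :: b :: t),
          PySem.List.pyRange_one_cons (show (0:Int) < ((a :: b :: t).length : Int) - 1 by simp),
          List.map_cons]
    have h01 : (0:Int) + 1 = 1 := by norm_num
    rw [h01] at hlinesR
    have hB : changes lines 0 lines.length = adjCount lines := by
      rw [changes, changesGo_eq lines (lines.length - 0) 0 lines.length (by omega) (by omega)]
      simp
    rw [hB, ← hlinesR, runCount_eq_adjCount lines hne]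
    omega
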